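-- pv_equiv track=rewrite | github.com/milmip/Flight-Viewer1.0 | app/model.py | get_triangleIDX
-- ===== SOURCE A (Python) =====
-- def get_triangleIDX(l):
--     idx = []
--     idxTri = []
--     line = []
--
--     for i in range(l):
--         del line
--         line = []
--         for j in range(l+1):
--             line.append((i, j))
--             line.append((i+1, j))
--         idx.append(line)
--
--     for liine in idx:
--         for i in range(2 * l):
--             idxTri.append((liine[i], liine[i+1], liine[i+2]))
--
--     return idxTri
-- ===== SOURCE B (Python) =====
-- def get_triangleIDX(l):
--     # Emit each triangle directly from the arithmetic vertex formula
--     # vertex(i, k) = (i + k % 2, k // 2); no intermediate index table.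
--     return [((i + m % 2, m // 2),
--              (i + (m + 1) % 2, (m + 1) // 2),
--              (i + (m + 2) % 2, (m + 2) // 2))
--             for i in range(l)
--             for m in range(2 * l)]
-- ===== Notes on version B (the rewrite author's own statement) =====
-- stated objective: simpler
-- what changed: B never materializes the per-row vertex list or the idx table A builds; it emits each triangle directly from the arithmetic formula vertex(i,k) = (i + k%2, k//2) for positions m, m+1, m+2.
import Mathlib
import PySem

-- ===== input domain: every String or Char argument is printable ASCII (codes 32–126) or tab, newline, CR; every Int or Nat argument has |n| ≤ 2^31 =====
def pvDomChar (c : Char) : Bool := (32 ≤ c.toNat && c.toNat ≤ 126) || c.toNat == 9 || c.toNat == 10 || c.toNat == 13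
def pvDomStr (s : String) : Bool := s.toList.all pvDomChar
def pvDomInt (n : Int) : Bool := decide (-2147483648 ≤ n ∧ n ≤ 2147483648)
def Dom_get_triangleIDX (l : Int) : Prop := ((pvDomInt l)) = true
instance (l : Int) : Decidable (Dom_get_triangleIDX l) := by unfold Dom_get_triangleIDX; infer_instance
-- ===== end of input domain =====

-- B replaces A's intermediate per-row vertex lists with a direct arithmetic formula; same output, same cost.

-- ===== PORT A =====
-- liine[i] / liine[i+1] / liine[i+2] are always in range (the row list has 2*l+2
-- elements and i < 2*l), so the pyGetD default is never used and A never raises.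
def get_triangleIDX (l : Int) : List ((Int × Int) × (Int × Int) × (Int × Int)) :=
  let idx : List (List (Int × Int)) :=
    (PySem.List.pyRange 0 l 1).foldl (fun idx i =>
      let line : List (Int × Int) :=
        (PySem.List.pyRange 0 (l + 1) 1).foldl
          (fun line j => line ++ [(i, j)] ++ [(i + 1, j)]) []
      idx ++ [line]) []
  idx.foldl (fun idxTri liine =>
    (PySem.List.pyRange 0 (2 * l) 1).foldl (fun idxTri i =>
      idxTri ++ [(PySem.List.pyGetD liine i (0, 0),
                  PySem.List.pyGetD liine (i + 1) (0, 0),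
                  PySem.List.pyGetD liine (i + 2) (0, 0))]) idxTri) []

-- ===== PORT B =====
-- vertex(i, k) = (i + k % 2, k // 2)
def triVert (i k : Int) : Int × Int := (i + PySem.Int.mod k 2, PySem.Int.floordiv k 2)

def get_triangleIDX_alt (l : Int) : List ((Int × Int) × (Int × Int) × (Int × Int)) :=
  (PySem.List.pyRange 0 l 1).flatMap (fun i =>
    (PySem.List.pyRange 0 (2 * l) 1).map (fun m =>
      (triVert i m, triVert i (m + 1), triVert i (m + 2))))

-- ===== PRECONDITION & SPEC =====
def Spec_get_triangleIDX (l : Int) (out : List ((Int × Int) × (Int × Int) × (Int × Int))) : Prop := out = get_triangleIDX_alt l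
instance (l : Int) (out : List ((Int × Int) × (Int × Int) × (Int × Int))) : Decidable (Spec_get_triangleIDX l out) := by unfold Spec_get_triangleIDX; infer_instance

-- ===== CLAIM (what is proved, stated in full; the proofs are below) =====
def Claim_equal_get_triangleIDX : Prop := ∀ (l : Int), Dom_get_triangleIDX l → Spec_get_triangleIDX l (get_triangleIDX l)

-- ===== LEMMAS AND PROOFS =====

-- A's row list equals the vertex formula mapped over positions 0 .. 2n+1.
theorem line_eq_map (i : Int) (n : Nat) :
    (PySem.List.pyRange 0 (n : Int) 1).flatMap (fun j => [(i, j), (i + 1, j)])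
      = (PySem.List.pyRange 0 (2 * (n : Int)) 1).map (triVert i) := by
  induction n with
  | zero => simp [PySem.List.pyRange_one_eq_nil]
  | succ n ih =>
    have h1 : ((n + 1 : Nat) : Int) = (n : Int) + 1 := by push_cast; ring
    have h2 : (2 : Int) * ((n : Int) + 1) = (2 * (n : Int) + 1) + 1 := by ring
    rw [h1, PySem.List.pyRange_one_succ_right (by positivity),
        h2, PySem.List.pyRange_one_succ_right (by positivity),
        PySem.List.pyRange_one_succ_right (by positivity)]
    simp only [List.flatMap_append, List.map_append, ih, List.flatMap_cons,
      List.flatMap_nil, List.append_nil, List.map_cons, List.map_nil, List.append_assoc]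
    congr 1
    have hm : ∀ k : Int, 0 ≤ k → triVert i k = (i + k % 2, k / 2) := by
      intro k hk
      simp [triVert]
    rw [hm (2 * (n : Int)) (by positivity), hm (2 * (n : Int) + 1) (by positivity)]
    have e1 : (2 * (n : Int)) % 2 = 0 := by omega
    have e2 : (2 * (n : Int)) / 2 = (n : Int) := by omega
    have e3 : (2 * (n : Int) + 1) % 2 = 1 := by omega
    have e4 : (2 * (n : Int) + 1) / 2 = (n : Int) := by omega
    simp [e1, e2, e3, e4]

-- ===== VERDICT (by name: the statement is the Claim_ definition above) =====
theorem get_triangleIDX_spec : Claim_equal_get_triangleIDX := by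
  intro l _
  show get_triangleIDX l = get_triangleIDX_alt l
  rcases (by omega : l ≤ 0 ∨ 0 < l) with hl | hl
  · simp [get_triangleIDX, get_triangleIDX_alt, PySem.List.pyRange_one_eq_nil hl]
  · -- write l as a natural number cast
    obtain ⟨n, rfl⟩ : ∃ n : Nat, l = (n : Int) := ⟨l.toNat, (Int.toNat_of_nonneg hl.le).symm⟩
    unfold get_triangleIDX get_triangleIDX_alt
    -- inner row construction: foldl append-pairs = flatMap = map of the vertex formula
    have hline : ∀ i : Int,
        (PySem.List.pyRange 0 ((n : Int) + 1) 1).foldl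
          (fun line j => line ++ [(i, j)] ++ [(i + 1, j)]) []
        = (PySem.List.pyRange 0 (2 * (n : Int) + 2) 1).map (triVert i) := by
      intro i
      simp only [List.append_assoc, List.singleton_append]
      rw [PySem.List.foldl_append_eq_flatMap, List.nil_append]
      have hc : ((n : Int) + 1) = (((n + 1 : Nat) : Int)) := by push_cast; ring
      rw [hc, line_eq_map i (n + 1)]
      have : (2 : Int) * (((n + 1 : Nat)) : Int) = 2 * (n : Int) + 2 := by push_cast; ring
      rw [this]
    simp only [hline, PySem.List.foldl_append_singleton_eq_map, List.nil_append]
    -- outer loop: foldl appending per-row triple lists = flatMap over the rows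
    rw [PySem.List.foldl_append_eq_flatMap, List.nil_append, List.flatMap_map]
    congr 1
    funext i
    refine List.map_congr_left ?_
    intro m hm
    obtain ⟨hm0, hm2⟩ := (PySem.List.mem_pyRange_one).mp hm
    rw [PySem.List.pyGetD_map_pyRange_of_nonneg _ _ _ _ hm0 (by omega),
        PySem.List.pyGetD_map_pyRange_of_nonneg _ _ _ _ (by omega) (by omega),
        PySem.List.pyGetD_map_pyRange_of_nonneg _ _ _ _ (by omega) (by omega)]
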